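-- pv_equiv track=rewrite | github.com/Aries298/LeetCode-Solutions | 1020-number-of-enclaves/1020-number-of-enclaves.py | numEnclaves
-- ===== SOURCE A (Python) =====
-- from typing import List
--
-- def numEnclaves(grid: List[List[int]]) -> int:
--     ROW ,COL = len(grid),len(grid[0])
--     def dfs(r,c):
--         if r < 0 or c < 0 or r == ROW or c == COL or not grid[r][c] or (r,c) in visit:
--             return 0
--         visit.add((r,c))
--         res = 1
--         direct = [[0,1],[0,-1],[1,0],[-1,0]]
--         for dr , dc in direct:
--             res += dfs(r+dr ,c + dc)
--         return res
--
--
--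
--     visit = set()
--     land, borderLand = 0 ,0
--     for r in range(ROW):
--         for c in range(COL):
--             land += grid[r][c]
--             if (grid[r][c] and (r,c) not in visit and (c in [0 , COL -1] or r in [0,ROW-1])):
--                 borderLand += dfs(r,c)
--     return land - borderLand
-- ===== SOURCE B (Python) =====
-- from collections import deque
--
-- def numEnclaves(grid):
--     ROW, COL = len(grid), len(grid[0])
--     visit = set()
--     queue = deque()
--     # seed: every land cell on the border
--     for r in range(ROW):
--         for c in range(COL):
--             if (r == 0 or r == ROW - 1 or c == 0 or c == COL - 1) \
--                     and grid[r][c] and (r, c) not in visit: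
--                 visit.add((r, c))
--                 queue.append((r, c))
--     # multi-source BFS, marking on enqueue
--     while queue:
--         r, c = queue.popleft()
--         if r + 1 < ROW and grid[r + 1][c] and (r + 1, c) not in visit:
--             visit.add((r + 1, c)); queue.append((r + 1, c))
--         if r - 1 >= 0 and grid[r - 1][c] and (r - 1, c) not in visit:
--             visit.add((r - 1, c)); queue.append((r - 1, c))
--         if c + 1 < COL and grid[r][c + 1] and (r, c + 1) not in visit:
--             visit.add((r, c + 1)); queue.append((r, c + 1))
--         if c - 1 >= 0 and grid[r][c - 1] and (r, c - 1) not in visit: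
--             visit.add((r, c - 1)); queue.append((r, c - 1))
--     total = 0
--     for r in range(ROW):
--         for c in range(COL):
--             total += grid[r][c]
--     return total - len(visit)
-- ===== Notes on version B (the rewrite author's own statement) =====
-- stated objective: alternative
-- what changed: Replaces the border-triggered recursive DFS (which counts land and subtracts the DFS return values) with an iterative multi-source BFS: all border land cells are enqueued first, the FIFO queue is drained marking neighbours on enqueue, and the grid total minus the visited-set size is returned.
import Mathlib
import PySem

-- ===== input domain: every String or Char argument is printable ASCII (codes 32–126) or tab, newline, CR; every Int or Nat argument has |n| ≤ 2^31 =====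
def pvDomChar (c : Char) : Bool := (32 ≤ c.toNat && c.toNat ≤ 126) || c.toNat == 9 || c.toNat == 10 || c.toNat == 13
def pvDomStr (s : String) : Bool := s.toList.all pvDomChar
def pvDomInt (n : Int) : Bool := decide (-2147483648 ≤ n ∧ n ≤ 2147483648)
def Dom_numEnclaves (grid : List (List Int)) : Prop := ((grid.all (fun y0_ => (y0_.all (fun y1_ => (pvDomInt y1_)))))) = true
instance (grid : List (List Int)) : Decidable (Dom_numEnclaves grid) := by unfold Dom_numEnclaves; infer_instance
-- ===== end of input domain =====

-- B replaces A's recursive border DFS (land minus borderLand arithmetic) by an iterative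
-- multi-source BFS from a queue of border land cells, returning total minus visited count.

-- ===== PORT A =====
-- recursive dfs of A, with the Python's mutable `visit` set threaded as state and the
-- returned count paired with it; `fuel` only makes the recursion total (A's dfs terminates
-- because `visit` grows; with fuel > ROW*COL the fuel branch is never reached).
def dfsA (grid : List (List Int)) (ROW COL : Int) :
    Nat → Int → Int → PySem.Set (Int × Int) → Int × PySem.Set (Int × Int)
  | 0, _, _, visit => (0, visit)
  | fuel + 1, r, c, visit =>
    -- if r < 0 or c < 0 or r == ROW or c == COL or not grid[r][c] or (r,c) in visit: return 0
    if r < 0 ∨ c < 0 ∨ r = ROW ∨ c = COL ∨ (grid.getD r.toNat []).getD c.toNat 0 = 0 ∨ (r, c) ∈ visit then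
      (0, visit)
    else
      -- visit.add((r,c)); res = 1; for dr, dc in direct: res += dfs(r+dr, c+dc)
      [((0 : Int), (1 : Int)), (0, -1), (1, 0), (-1, 0)].foldl
        (fun st d =>
          let out := dfsA grid ROW COL fuel (r + d.1) (c + d.2) st.2
          (st.1 + out.1, out.2))
        (1, PySem.Set.add visit (r, c))

-- body of A's inner loop over one cell (r, c): add grid[r][c] to land and, for an
-- unvisited border land cell, run dfs and add its count to borderLand
def stepA (grid : List (List Int)) (ROW COL : Int) (fuel : Nat) (r c : Int)
    (st : Int × Int × PySem.Set (Int × Int)) : Int × Int × PySem.Set (Int × Int) :=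
  let v := (grid.getD r.toNat []).getD c.toNat 0
  let st1 : Int × Int × PySem.Set (Int × Int) := (st.1 + v, st.2.1, st.2.2)
  if v ≠ 0 ∧ (r, c) ∉ st1.2.2 ∧ (c = 0 ∨ c = COL - 1 ∨ r = 0 ∨ r = ROW - 1) then
    let out := dfsA grid ROW COL fuel r c st1.2.2
    (st1.1, st1.2.1 + out.1, out.2)
  else st1

def numEnclaves (grid : List (List Int)) : Int :=
  let ROW : Int := grid.length
  let COL : Int := (grid.headD []).length   -- len(grid[0]); Pre_ gives grid ≠ []
  let fuel : Nat := grid.length * (grid.headD []).length + 1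
  let st :=
    (PySem.List.pyRange 0 ROW 1).foldl (fun st r =>
      (PySem.List.pyRange 0 COL 1).foldl (fun st c => stepA grid ROW COL fuel r c st) st)
      ((0 : Int), (0 : Int), (PySem.Set.empty : PySem.Set (Int × Int)))
  st.1 - st.2.1

-- ===== PORT B =====
-- FIFO queue drain of Source B's while loop; visit marked on enqueue; fuel only for totality
-- (every iteration pops one element and each cell is enqueued at most once).
def bfsB (grid : List (List Int)) (ROW COL : Int) :
    Nat → List (Int × Int) → PySem.Set (Int × Int) → PySem.Set (Int × Int)
  | 0, _, visit => visit
  | _ + 1, [], visit => visit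
  | fuel + 1, (r, c) :: queue, visit =>
    let s1 : List (Int × Int) × PySem.Set (Int × Int) :=
      if r + 1 < ROW ∧ (grid.getD (r + 1).toNat []).getD c.toNat 0 ≠ 0 ∧ (r + 1, c) ∉ visit then
        (queue ++ [(r + 1, c)], PySem.Set.add visit (r + 1, c)) else (queue, visit)
    let s2 : List (Int × Int) × PySem.Set (Int × Int) :=
      if r - 1 ≥ 0 ∧ (grid.getD (r - 1).toNat []).getD c.toNat 0 ≠ 0 ∧ (r - 1, c) ∉ s1.2 then
        (s1.1 ++ [(r - 1, c)], PySem.Set.add s1.2 (r - 1, c)) else (s1.1, s1.2)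
    let s3 : List (Int × Int) × PySem.Set (Int × Int) :=
      if c + 1 < COL ∧ (grid.getD r.toNat []).getD (c + 1).toNat 0 ≠ 0 ∧ (r, c + 1) ∉ s2.2 then
        (s2.1 ++ [(r, c + 1)], PySem.Set.add s2.2 (r, c + 1)) else (s2.1, s2.2)
    let s4 : List (Int × Int) × PySem.Set (Int × Int) :=
      if c - 1 ≥ 0 ∧ (grid.getD r.toNat []).getD (c - 1).toNat 0 ≠ 0 ∧ (r, c - 1) ∉ s3.2 then
        (s3.1 ++ [(r, c - 1)], PySem.Set.add s3.2 (r, c - 1)) else (s3.1, s3.2)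
    bfsB grid ROW COL fuel s4.1 s4.2

-- body of Source B's seeding loop: enqueue and mark an unvisited border land cell
def seedB (grid : List (List Int)) (ROW COL : Int) (r c : Int)
    (st : List (Int × Int) × PySem.Set (Int × Int)) :
    List (Int × Int) × PySem.Set (Int × Int) :=
  if (r = 0 ∨ r = ROW - 1 ∨ c = 0 ∨ c = COL - 1) ∧
      (grid.getD r.toNat []).getD c.toNat 0 ≠ 0 ∧ (r, c) ∉ st.2 then
    (st.1 ++ [(r, c)], PySem.Set.add st.2 (r, c))
  else st

def numEnclaves_alt (grid : List (List Int)) : Int :=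
  let ROW : Int := grid.length
  let COL : Int := (grid.headD []).length
  let seed :=
    (PySem.List.pyRange 0 ROW 1).foldl (fun st r =>
      (PySem.List.pyRange 0 COL 1).foldl (fun st c => seedB grid ROW COL r c st) st)
      (([] : List (Int × Int)), (PySem.Set.empty : PySem.Set (Int × Int)))
  let fuel : Nat := grid.length * (grid.headD []).length + 1
  let visit := bfsB grid ROW COL fuel seed.1 seed.2
  let total :=
    (PySem.List.pyRange 0 ROW 1).foldl (fun t r =>
      (PySem.List.pyRange 0 COL 1).foldl (fun t c =>
        t + (grid.getD r.toNat []).getD c.toNat 0) t) (0 : Int)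
  total - visit.length

-- ===== PRECONDITION & SPEC =====
-- Pre_ excludes exactly the inputs where the Python A raises IndexError: the empty grid
-- (grid[0]) and grids with a row shorter than the first row (grid[r][c] for c < len(grid[0])).
def Pre_numEnclaves (grid : List (List Int)) : Prop :=
  grid ≠ [] ∧ ∀ row ∈ grid, (grid.headD []).length ≤ row.length
instance (grid : List (List Int)) : Decidable (Pre_numEnclaves grid) := by
  unfold Pre_numEnclaves; infer_instance

def pvWitness_numEnclaves : List (List Int) := [[1, 0, 1], [0, 1, 0], [0, 0, 1]]

def Spec_numEnclaves (grid : List (List Int)) (out : Int) : Prop := out = numEnclaves_alt grid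
instance (grid : List (List Int)) (out : Int) : Decidable (Spec_numEnclaves grid out) := by unfold Spec_numEnclaves; infer_instance

-- ===== CLAIM (what is proved, stated in full; the proofs are below) =====
def Claim_equal_numEnclaves : Prop := ∀ (grid : List (List Int)), Dom_numEnclaves grid → Pre_numEnclaves grid → Spec_numEnclaves grid (numEnclaves grid)

-- ===== LEMMAS AND PROOFS =====
abbrev pvVal (grid : List (List Int)) (p : Int × Int) : Int :=
  (grid.getD p.1.toNat []).getD p.2.toNat 0

abbrev pvGood (grid : List (List Int)) (p : Int × Int) : Prop :=
  0 ≤ p.1 ∧ p.1 < (grid.length : Int) ∧ 0 ≤ p.2 ∧ p.2 < ((grid.headD []).length : Int) ∧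
    pvVal grid p ≠ 0

abbrev pvSeed (grid : List (List Int)) (p : Int × Int) : Prop :=
  pvGood grid p ∧ (p.1 = 0 ∨ p.1 = (grid.length : Int) - 1 ∨ p.2 = 0 ∨
    p.2 = ((grid.headD []).length : Int) - 1)

def pvAdj (p : Int × Int) : List (Int × Int) :=
  [(p.1, p.2 + 1), (p.1, p.2 - 1), (p.1 + 1, p.2), (p.1 - 1, p.2)]

def pvEdge (grid : List (List Int)) (p q : Int × Int) : Prop :=
  pvGood grid p ∧ pvGood grid q ∧ q ∈ pvAdj p

def pvReach (grid : List (List Int)) (p : Int × Int) : Prop :=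
  ∃ s, pvSeed grid s ∧ Relation.ReflTransGen (pvEdge grid) s p

lemma pvReach_step {grid : List (List Int)} {p q : Int × Int}
    (h : pvReach grid p) (e : pvEdge grid p q) : pvReach grid q := by
  obtain ⟨s, hs, hr⟩ := h
  exact ⟨s, hs, hr.tail e⟩

lemma pvClosed_absorb {grid : List (List Int)} {V : List (Int × Int)}
    (hcl : ∀ p ∈ V, ∀ q, pvEdge grid p q → q ∈ V)
    (hseed : ∀ p, pvSeed grid p → p ∈ V) :
    ∀ p, pvReach grid p → p ∈ V := by
  intro p hp
  obtain ⟨s, hs, hr⟩ := hp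
  induction hr with
  | refl => exact hseed _ hs
  | tail _ e ih => exact hcl _ ih _ e

def pvRem (grid : List (List Int)) (V : List (Int × Int)) : Nat :=
  ((Finset.range grid.length ×ˢ Finset.range (grid.headD []).length).filter
     (fun rc => pvGood grid ((rc.1 : Int), (rc.2 : Int)) ∧ ((rc.1 : Int), (rc.2 : Int)) ∉ V)).card

lemma pvRem_lt (grid : List (List Int)) (V : List (Int × Int)) :
    pvRem grid V < grid.length * (grid.headD []).length + 1 := by
  have h := Finset.card_filter_le (Finset.range grid.length ×ˢ Finset.range (grid.headD []).length)
      (fun rc => pvGood grid ((rc.1 : Int), (rc.2 : Int)) ∧ ((rc.1 : Int), (rc.2 : Int)) ∉ V)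
  rw [Finset.card_product, Finset.card_range, Finset.card_range] at h
  unfold pvRem
  omega

lemma pvRem_lt_of (grid : List (List Int)) {V W : List (Int × Int)} {q : Int × Int}
    (hq : pvGood grid q) (hqV : q ∉ V) (hqW : q ∈ W) (h : ∀ p ∈ V, p ∈ W) :
    pvRem grid W < pvRem grid V := by
  apply Finset.card_lt_card
  constructor
  · intro x hx
    simp only [Finset.mem_filter] at hx ⊢
    exact ⟨hx.1, hx.2.1, fun hm => hx.2.2 (h _ hm)⟩
  · intro hsub
    have hx : (q.1.toNat, q.2.toNat) ∈ (Finset.range grid.length ×ˢ Finset.range (grid.headD []).length).filter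
        (fun rc => pvGood grid ((rc.1 : Int), (rc.2 : Int)) ∧ ((rc.1 : Int), (rc.2 : Int)) ∉ V) := by
      have hq1 : ((q.1.toNat : Int), (q.2.toNat : Int)) = q := by
        obtain ⟨h1, _, h2, _⟩ := hq
        exact Prod.ext (Int.toNat_of_nonneg h1) (Int.toNat_of_nonneg h2)
      simp only [Finset.mem_filter, Finset.mem_product, Finset.mem_range, hq1]
      refine ⟨⟨?_, ?_⟩, hq, hqV⟩
      · omega
      · omega
    have := hsub hx
    simp only [Finset.mem_filter] at this
    have hq1 : ((q.1.toNat : Int), (q.2.toNat : Int)) = q := by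
      obtain ⟨h1, _, h2, _⟩ := hq
      exact Prod.ext (Int.toNat_of_nonneg h1) (Int.toNat_of_nonneg h2)
    rw [hq1] at this
    exact this.2.2 hqW

def DfsConcl (grid : List (List Int)) (fuel : Nat) : Prop :=
  ∀ (r c : Int) (V : List (Int × Int)),
    r ≤ (grid.length : Int) → c ≤ ((grid.headD []).length : Int) →
    pvRem grid V < fuel → V.Nodup →
    ∃ N, dfsA grid grid.length (grid.headD []).length fuel r c V = ((N.length : Int), V ++ N) ∧
      (V ++ N).Nodup ∧ (∀ p ∈ N, pvGood grid p) ∧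
      (∀ p ∈ N, Relation.ReflTransGen (pvEdge grid) (r, c) p) ∧
      (∀ p ∈ N, ∀ q, pvEdge grid p q → q ∈ V ++ N) ∧
      (pvGood grid (r, c) → (r, c) ∉ V → (r, c) ∈ N) ∧
      ((¬ pvGood grid (r, c) ∨ (r, c) ∈ V) → N = [])

def DInv (grid : List (List Int)) (root : Int × Int) (V₀ : List (Int × Int))
    (st : Int × List (Int × Int)) (pend : List (Int × Int)) : Prop :=
  ∃ N, st = ((N.length : Int), V₀ ++ N) ∧ (V₀ ++ N).Nodup ∧ (∀ p ∈ N, pvGood grid p) ∧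
    (∀ p ∈ N, Relation.ReflTransGen (pvEdge grid) root p) ∧ root ∈ N ∧
    (∀ p ∈ N, ∀ q, pvEdge grid p q → q ∈ V₀ ++ N ∨ (p = root ∧ q ∈ pend))

lemma dfs_chain (grid : List (List Int)) (fuel : Nat) (IH : DfsConcl grid fuel)
    (root t : Int × Int) (V₀ : List (Int × Int)) (pend : List (Int × Int))
    (hgeo : t ∈ pvAdj root) (htr : t.1 ≤ (grid.length : Int))
    (htc : t.2 ≤ ((grid.headD []).length : Int))
    (hroot : pvGood grid root) (hrem : pvRem grid V₀ < fuel + 1)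
    (st : Int × List (Int × Int)) (hinv : DInv grid root V₀ st (t :: pend)) :
    DInv grid root V₀
      (st.1 + (dfsA grid grid.length (grid.headD []).length fuel t.1 t.2 st.2).1,
       (dfsA grid grid.length (grid.headD []).length fuel t.1 t.2 st.2).2) pend := by
  obtain ⟨N, hst, hnd, hgood, hreach, hrootN, hcl⟩ := hinv
  have hrootV₀ : root ∉ V₀ := fun h => (List.nodup_append.mp hnd).2.2 root h root hrootN rfl
  have hrem' : pvRem grid (V₀ ++ N) < fuel := by
    have h1 : pvRem grid (V₀ ++ N) < pvRem grid V₀ :=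
      pvRem_lt_of grid (hgood _ hrootN) hrootV₀ (by simp [hrootN])
        (fun p hp => by simp [hp])
    omega
  have hVnd : (V₀ ++ N).Nodup := hnd
  obtain ⟨N', heq, hnd', hgood', hreach', hcl', hin', hnil'⟩ :=
    IH t.1 t.2 (V₀ ++ N) htr htc hrem' hVnd
  rw [hst]
  simp only [heq]
  refine ⟨N ++ N', ?_, ?_, ?_, ?_, ?_, ?_⟩
  · simp only [Prod.mk.injEq]
    refine ⟨by push_cast [List.length_append]; ring, by simp [List.append_assoc]⟩
  · simpa [List.append_assoc] using hnd'
  · intro p hp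
    rcases List.mem_append.1 hp with h | h
    · exact hgood _ h
    · exact hgood' _ h
  · intro p hp
    rcases List.mem_append.1 hp with h | h
    · exact hreach _ h
    · -- p ∈ N' : N' nonempty so t is good and fresh
      have hne : N' ≠ [] := by intro h0; rw [h0] at hp h; simp at h
      have hgt : pvGood grid (t.1, t.2) ∧ (t.1, t.2) ∉ V₀ ++ N := by
        by_contra hc
        have : ¬ pvGood grid (t.1, t.2) ∨ (t.1, t.2) ∈ V₀ ++ N := by tauto
        exact hne (hnil' this)
      have hedge : pvEdge grid root t := ⟨hroot, by simpa using hgt.1, hgeo⟩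
      have := hreach' _ h
      exact Relation.ReflTransGen.head (by simpa using hedge) this
  · simp [hrootN]
  · intro p hp q hq
    rcases List.mem_append.1 hp with h | h
    · rcases hcl _ h _ hq with hmem | ⟨hpr, hqp⟩
      · left; rcases List.mem_append.1 hmem with h1 | h1 <;> simp [h1]
      · rcases List.mem_cons.1 hqp with h2 | h2
        · -- q = t : show q lands in the new visit set
          left
          rw [h2]
          by_cases hgt : pvGood grid (t.1, t.2) ∧ (t.1, t.2) ∉ V₀ ++ N
          · have h3 := hin' hgt.1 hgt.2
            have h4 : t ∈ N' := by simpa using h3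
            simp [h4]
          · have hcase : ¬ pvGood grid (t.1, t.2) ∨ (t.1, t.2) ∈ V₀ ++ N := by tauto
            rcases hcase with hbad | hmem
            · rw [h2] at hq
              exact absurd (by simpa using hq.2.1) (by simpa using hbad)
            · have h4 : t ∈ V₀ ++ N := by simpa using hmem
              rcases List.mem_append.1 h4 with h1 | h1 <;> simp [h1]
        · exact Or.inr ⟨hpr, h2⟩
    · left
      have := hcl' _ h _ hq
      simpa [List.append_assoc] using this

lemma dfsA_spec (grid : List (List Int)) : ∀ fuel : Nat, DfsConcl grid fuel := by
  intro fuel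
  induction fuel with
  | zero => intro r c V _ _ hrem _; omega
  | succ fuel IH =>
    intro r c V hr hc hrem hnd
    by_cases hg : r < 0 ∨ c < 0 ∨ r = (grid.length : Int) ∨ c = ((grid.headD []).length : Int) ∨
        (grid.getD r.toNat []).getD c.toNat 0 = 0 ∨ (r, c) ∈ V
    · refine ⟨[], ?_, by simpa using hnd, by simp, by simp, by simp, ?_, fun _ => rfl⟩
      · simp only [dfsA, if_pos hg]; simp
      · intro hgood hnotin
        obtain ⟨h1, h2, h3, h4, h5⟩ := hgood
        rcases hg with h | h | h | h | h | h
        · omega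
        · omega
        · omega
        · omega
        · exact absurd h h5
        · exact absurd h hnotin
    · push_neg at hg
      obtain ⟨hg1, hg2, hg3, hg4, hg5, hg6⟩ := hg
      have hgood : pvGood grid (r, c) := ⟨by omega, by omega, by omega, by omega, hg5⟩
      have hadd : PySem.Set.add V (r, c) = V ++ [(r, c)] := PySem.Set.add_of_not_mem hg6
      obtain ⟨hb1, hb2, hb3, hb4, -⟩ := id hgood
      have h0 : DInv grid (r, c) V ((1 : Int), PySem.Set.add V (r, c))
          [(r + 0, c + 1), (r + 0, c + -1), (r + 1, c + 0), (r + -1, c + 0)] := by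
        refine ⟨[(r, c)], by simp [hadd], ?_, by simpa using hgood, ?_, by simp, ?_⟩
        · rw [List.nodup_append]
          refine ⟨hnd, List.nodup_singleton _, ?_⟩
          intro a ha b hb
          simp only [List.mem_singleton] at hb
          subst hb
          exact fun h => hg6 (h ▸ ha)
        · intro p hp
          simp only [List.mem_singleton] at hp
          subst hp
          exact Relation.ReflTransGen.refl
        · intro p hp q hq
          simp only [List.mem_singleton] at hp
          subst hp
          right
          exact ⟨rfl, by simpa [pvAdj, sub_eq_add_neg] using hq.2.2⟩
      have h1 := dfs_chain grid fuel IH (r, c) (r + 0, c + 1) V _ (by simp [pvAdj])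
        (by show r + 0 ≤ ((grid.length : Nat) : Int); omega)
        (by show c + 1 ≤ (((grid.headD []).length : Nat) : Int); omega) hgood hrem _ h0
      have h2 := dfs_chain grid fuel IH (r, c) (r + 0, c + -1) V _
        (by simp [pvAdj, sub_eq_add_neg])
        (by show r + 0 ≤ ((grid.length : Nat) : Int); omega)
        (by show c + -1 ≤ (((grid.headD []).length : Nat) : Int); omega) hgood hrem _ h1
      have h3 := dfs_chain grid fuel IH (r, c) (r + 1, c + 0) V _ (by simp [pvAdj])
        (by show r + 1 ≤ ((grid.length : Nat) : Int); omega)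
        (by show c + 0 ≤ (((grid.headD []).length : Nat) : Int); omega) hgood hrem _ h2
      have h4 := dfs_chain grid fuel IH (r, c) (r + -1, c + 0) V _
        (by simp [pvAdj, sub_eq_add_neg])
        (by show r + -1 ≤ ((grid.length : Nat) : Int); omega)
        (by show c + 0 ≤ (((grid.headD []).length : Nat) : Int); omega) hgood hrem _ h3
      obtain ⟨N, hst, hnd', hgood', hreach', hrootN, hcl'⟩ := h4
      refine ⟨N, ?_, hnd', hgood', hreach', ?_, fun _ _ => hrootN, ?_⟩
      · have hg' : ¬ (r < 0 ∨ c < 0 ∨ r = (grid.length : Int) ∨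
            c = ((grid.headD []).length : Int) ∨
            (grid.getD r.toNat []).getD c.toNat 0 = 0 ∨ (r, c) ∈ V) := by
          simp only [not_or]
          exact ⟨by omega, by omega, hg3, hg4, hg5, hg6⟩
        simp only [dfsA, if_neg hg']
        simp only [List.foldl_cons, List.foldl_nil]
        exact hst
      · intro p hp q hq
        rcases hcl' p hp q hq with h | ⟨_, h⟩
        · exact h
        · simp at h
      · intro hcase
        rcases hcase with h | h
        · exact absurd hgood h
        · exact absurd h hg6

lemma bfs_step (grid : List (List Int)) (p₀ t : Int × Int) (Q V Q' V₀ M : List (Int × Int))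
    (hQ : Q = Q' ++ M) (hV : V = V₀ ++ M)
    (hnd : V.Nodup) (hgoodV : ∀ p ∈ V, pvGood grid p) (hreachV : ∀ p ∈ V, pvReach grid p)
    (hrem : pvRem grid V + M.length ≤ pvRem grid V₀)
    (hreach₀ : pvReach grid p₀) (hgood₀ : pvGood grid p₀) (hgeo : t ∈ pvAdj p₀)
    (b : Prop) [inst : Decidable b] (hb : b ↔ (pvGood grid t ∧ t ∉ V)) :
    ∃ M', (if b then (Q ++ [t], PySem.Set.add V t) else (Q, V)).1 = Q' ++ M' ∧
      (if b then (Q ++ [t], PySem.Set.add V t) else (Q, V)).2 = V₀ ++ M' ∧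
      (V₀ ++ M').Nodup ∧ (∀ p ∈ V₀ ++ M', pvGood grid p) ∧
      (∀ p ∈ V₀ ++ M', pvReach grid p) ∧
      pvRem grid (V₀ ++ M') + M'.length ≤ pvRem grid V₀ ∧
      (pvGood grid t → t ∈ V₀ ++ M') ∧ (∀ p ∈ V, p ∈ V₀ ++ M') := by
  by_cases hbb : b
  · obtain ⟨hgt, hnt⟩ := hb.mp hbb
    have hadd : PySem.Set.add V t = V ++ [t] := PySem.Set.add_of_not_mem hnt
    refine ⟨M ++ [t], ?_, ?_, ?_, ?_, ?_, ?_, ?_, ?_⟩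
    · simp [if_pos hbb, hQ]
    · simp only [if_pos hbb]
      rw [hadd, hV, List.append_assoc]
    · rw [← List.append_assoc, ← hV, ← hadd]
      rw [hadd, List.nodup_append]
      refine ⟨hnd, List.nodup_singleton _, ?_⟩
      intro a ha b' hb'
      simp only [List.mem_singleton] at hb'
      subst hb'
      exact fun h => hnt (h ▸ ha)
    · intro p hp
      rw [← List.append_assoc, ← hV] at hp
      rcases List.mem_append.1 hp with h | h
      · exact hgoodV _ h
      · simp only [List.mem_singleton] at h; subst h; exact hgt
    · intro p hp
      rw [← List.append_assoc, ← hV] at hp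
      rcases List.mem_append.1 hp with h | h
      · exact hreachV _ h
      · simp only [List.mem_singleton] at h
        subst h
        exact pvReach_step hreach₀ ⟨hgood₀, hgt, hgeo⟩
    · have hlt : pvRem grid (V ++ [t]) < pvRem grid V :=
        pvRem_lt_of grid hgt hnt (by simp) (fun p hp => by simp [hp])
      rw [← List.append_assoc, ← hV]
      simp only [List.length_append, List.length_singleton]
      omega
    · intro _
      rw [← List.append_assoc, ← hV]
      simp
    · intro p hp
      rw [← List.append_assoc, ← hV]
      simp [hp]
  · refine ⟨M, by simp [if_neg hbb, hQ], by simp [if_neg hbb, hV], by rw [← hV]; exact hnd,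
      by rw [← hV]; exact hgoodV, by rw [← hV]; exact hreachV, by rw [← hV]; omega, ?_,
      by rw [← hV]; exact fun p hp => hp⟩
    intro hgt
    rw [← hV]
    by_contra hnt
    exact hbb (hb.mpr ⟨hgt, hnt⟩)

def BfsConcl (grid : List (List Int)) (fuel : Nat) : Prop :=
  ∀ (Q V : List (Int × Int)),
    Q.length + pvRem grid V < fuel →
    V.Nodup → (∀ p ∈ V, pvGood grid p) → (∀ p ∈ Q, p ∈ V) →
    (∀ p ∈ V, pvReach grid p) →
    (∀ p ∈ V, p ∉ Q → ∀ q, pvEdge grid p q → q ∈ V) →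
    ∃ N, bfsB grid grid.length (grid.headD []).length fuel Q V = V ++ N ∧
      (V ++ N).Nodup ∧ (∀ p ∈ V ++ N, pvReach grid p) ∧
      (∀ p ∈ V ++ N, ∀ q, pvEdge grid p q → q ∈ V ++ N)

lemma bfsB_spec (grid : List (List Int)) : ∀ fuel : Nat, BfsConcl grid fuel := by
  intro fuel
  induction fuel with
  | zero => intro Q V h _ _ _ _ _; omega
  | succ fuel IH =>
    rintro (_ | ⟨⟨r, c⟩, Q'⟩) V hfuel hnd hgood hqmem hreach hcl
    · refine ⟨[], by simp [bfsB], by simpa using hnd, by simpa using hreach, ?_⟩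
      intro p hp q hq
      simpa using hcl p (by simpa using hp) (by simp) q hq
    · have hp₀V : (r, c) ∈ V := hqmem _ (by simp)
      obtain ⟨a1, a2, a3, a4, -⟩ := id (hgood _ hp₀V)
      obtain ⟨M1, hq1, hv1, hnd1, hgood1, hreach1, hrem1, hin1, hmono1⟩ :=
        bfs_step grid (r, c) (r + 1, c) Q' V Q' V [] (by simp) (by simp) hnd hgood hreach
          (by simp) (hreach _ hp₀V) (hgood _ hp₀V) (by simp [pvAdj])
          (r + 1 < (grid.length : Int) ∧
            (grid.getD (r + 1).toNat []).getD c.toNat 0 ≠ 0 ∧ (r + 1, c) ∉ V)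
          (by
            constructor
            · rintro ⟨h1, h2, h3⟩
              exact ⟨⟨by show (0 : Int) ≤ r + 1; omega, h1, a3, a4, h2⟩, h3⟩
            · rintro ⟨⟨g1, g2, g3, g4, g5⟩, h6⟩
              exact ⟨g2, g5, h6⟩)
      obtain ⟨M2, hq2, hv2, hnd2, hgood2, hreach2, hrem2, hin2, hmono2⟩ :=
        bfs_step grid (r, c) (r - 1, c) _ _ Q' V M1 hq1 hv1 (by rw [hv1]; exact hnd1)
          (by rw [hv1]; exact hgood1) (by rw [hv1]; exact hreach1) (by rw [hv1]; exact hrem1)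
          (hreach _ hp₀V) (hgood _ hp₀V) (by simp [pvAdj])
          (r - 1 ≥ 0 ∧
            (grid.getD (r - 1).toNat []).getD c.toNat 0 ≠ 0 ∧ (r - 1, c) ∉ _)
          (by
            constructor
            · rintro ⟨h1, h2, h3⟩
              exact ⟨⟨by show (0 : Int) ≤ r - 1; omega, by show r - 1 < _; omega, a3, a4, h2⟩, h3⟩
            · rintro ⟨⟨g1, g2, g3, g4, g5⟩, h6⟩
              exact ⟨g1, g5, h6⟩)
      obtain ⟨M3, hq3, hv3, hnd3, hgood3, hreach3, hrem3, hin3, hmono3⟩ :=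
        bfs_step grid (r, c) (r, c + 1) _ _ Q' V M2 hq2 hv2 (by rw [hv2]; exact hnd2)
          (by rw [hv2]; exact hgood2) (by rw [hv2]; exact hreach2) (by rw [hv2]; exact hrem2)
          (hreach _ hp₀V) (hgood _ hp₀V) (by simp [pvAdj])
          (c + 1 < ((grid.headD []).length : Int) ∧
            (grid.getD r.toNat []).getD (c + 1).toNat 0 ≠ 0 ∧ (r, c + 1) ∉ _)
          (by
            constructor
            · rintro ⟨h1, h2, h3⟩
              exact ⟨⟨a1, a2, by show (0 : Int) ≤ c + 1; omega, h1, h2⟩, h3⟩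
            · rintro ⟨⟨g1, g2, g3, g4, g5⟩, h6⟩
              exact ⟨g4, g5, h6⟩)
      obtain ⟨M4, hq4, hv4, hnd4, hgood4, hreach4, hrem4, hin4, hmono4⟩ :=
        bfs_step grid (r, c) (r, c - 1) _ _ Q' V M3 hq3 hv3 (by rw [hv3]; exact hnd3)
          (by rw [hv3]; exact hgood3) (by rw [hv3]; exact hreach3) (by rw [hv3]; exact hrem3)
          (hreach _ hp₀V) (hgood _ hp₀V) (by simp [pvAdj])
          (c - 1 ≥ 0 ∧
            (grid.getD r.toNat []).getD (c - 1).toNat 0 ≠ 0 ∧ (r, c - 1) ∉ _)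
          (by
            constructor
            · rintro ⟨h1, h2, h3⟩
              exact ⟨⟨a1, a2, by show (0 : Int) ≤ c - 1; omega, by show c - 1 < _; omega, h2⟩, h3⟩
            · rintro ⟨⟨g1, g2, g3, g4, g5⟩, h6⟩
              exact ⟨g3, g5, h6⟩)
      have hstep12 : ∀ p, p ∈ V ++ M1 → p ∈ V ++ M2 := fun p hp =>
        hmono2 p (by rw [hv1]; exact hp)
      have hstep23 : ∀ p, p ∈ V ++ M2 → p ∈ V ++ M3 := fun p hp =>
        hmono3 p (by rw [hv2]; exact hp)
      have hstep34 : ∀ p, p ∈ V ++ M3 → p ∈ V ++ M4 := fun p hp =>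
        hmono4 p (by rw [hv3]; exact hp)
      have hT : ∀ q, pvGood grid q → q ∈ pvAdj (r, c) → q ∈ V ++ M4 := by
        intro q hgq hqadj
        simp only [pvAdj, List.mem_cons, List.not_mem_nil, or_false] at hqadj
        rcases hqadj with h | h | h | h
        · subst h; exact hstep34 _ (hin3 hgq)
        · subst h; exact hin4 hgq
        · subst h; exact hstep34 _ (hstep23 _ (hstep12 _ (hin1 hgq)))
        · subst h; exact hstep34 _ (hstep23 _ (hin2 hgq))
      obtain ⟨N', hrun', hnd', hreach', hcl'⟩ := IH (Q' ++ M4) (V ++ M4)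
        (by
          have h := List.length_append (as := Q') (bs := M4)
          simp only [List.length_cons] at hfuel
          omega)
        hnd4 hgood4
        (by
          intro p hp
          rcases List.mem_append.1 hp with h | h
          · exact List.mem_append_left _ (hqmem _ (List.mem_cons_of_mem _ h))
          · exact List.mem_append_right _ h)
        hreach4
        (by
          intro p hp hpq q hq
          rcases List.mem_append.1 hp with hpV | hpM
          · by_cases hpr : p = (r, c)
            · subst hpr
              exact hT q hq.2.1 hq.2.2
            · have hpnotQ : p ∉ (r, c) :: Q' := by
                intro hmem
                rcases List.mem_cons.1 hmem with h | h
                · exact hpr h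
                · exact hpq (List.mem_append_left _ h)
              exact List.mem_append_left _ (hcl p hpV hpnotQ q hq)
          · exact absurd (List.mem_append_right _ hpM) hpq)
      refine ⟨M4 ++ N', ?_, by simpa [List.append_assoc] using hnd', ?_, ?_⟩
      · show bfsB grid grid.length (grid.headD []).length (fuel + 1) ((r, c) :: Q') V = _
        simp only [bfsB]
        rw [hq4, hv4, hrun', List.append_assoc]
      · intro p hp
        exact hreach' p (by simpa [List.append_assoc] using hp)
      · intro p hp q hq
        have := hcl' p (by simpa [List.append_assoc] using hp) q hq
        simpa [List.append_assoc] using this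

def pvRowSum (grid : List (List Int)) (r : Int) (cn : Nat) : Int :=
  ((List.range cn).map (fun j => (grid.getD r.toNat []).getD j 0)).sum

def pvSumR (grid : List (List Int)) (rn : Nat) : Int :=
  ((List.range rn).map (fun i => pvRowSum grid (i : Int) (grid.headD []).length)).sum

lemma pvRowSum_succ (grid : List (List Int)) (r : Int) (n : Nat) :
    pvRowSum grid r (n + 1) = pvRowSum grid r n + (grid.getD r.toNat []).getD n 0 := by
  simp [pvRowSum, List.range_succ]

lemma pvSumR_succ (grid : List (List Int)) (n : Nat) :
    pvSumR grid (n + 1) = pvSumR grid n + pvRowSum grid (n : Int) (grid.headD []).length := by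
  simp [pvSumR, List.range_succ]

def AInv (grid : List (List Int)) (r c : Int) (st : Int × Int × List (Int × Int)) : Prop :=
  st.2.2.Nodup ∧ (∀ p ∈ st.2.2, pvGood grid p) ∧ (∀ p ∈ st.2.2, pvReach grid p) ∧
  (∀ p ∈ st.2.2, ∀ q, pvEdge grid p q → q ∈ st.2.2) ∧
  st.2.1 = (st.2.2.length : Int) ∧
  st.1 = pvSumR grid r.toNat + pvRowSum grid r c.toNat ∧
  (∀ p, pvSeed grid p → (p.1 < r ∨ (p.1 = r ∧ p.2 < c)) → p ∈ st.2.2)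

lemma stepA_inv (grid : List (List Int)) (r c : Int) (hr0 : 0 ≤ r)
    (hr : r < (grid.length : Int)) (hc0 : 0 ≤ c) (hc : c < ((grid.headD []).length : Int))
    (st : Int × Int × List (Int × Int)) (h : AInv grid r c st) :
    AInv grid r (c + 1)
      (stepA grid grid.length (grid.headD []).length
        (grid.length * (grid.headD []).length + 1) r c st) := by
  obtain ⟨h1, h2, h3, h4, h5, h6, h7⟩ := h
  have hcn : (c + 1).toNat = c.toNat + 1 := by omega
  have hland : st.1 + (grid.getD r.toNat []).getD c.toNat 0 =
      pvSumR grid r.toNat + pvRowSum grid r (c + 1).toNat := by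
    rw [h6, hcn, pvRowSum_succ]
    ring
  simp only [stepA]
  by_cases hg : (grid.getD r.toNat []).getD c.toNat 0 ≠ 0 ∧ (r, c) ∉ st.2.2 ∧
      (c = 0 ∨ c = ((grid.headD []).length : Int) - 1 ∨ r = 0 ∨ r = (grid.length : Int) - 1)
  · rw [if_pos hg]
    obtain ⟨hv, hnotin, hborder⟩ := hg
    have hgoodrc : pvGood grid (r, c) := ⟨hr0, hr, hc0, hc, hv⟩
    have hseedrc : pvSeed grid (r, c) := ⟨hgoodrc, by tauto⟩
    obtain ⟨N, heq, hnd', hgood', hreach', hcl', hin, -⟩ :=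
      dfsA_spec grid (grid.length * (grid.headD []).length + 1) r c st.2.2
        (by omega) (by omega) (pvRem_lt grid st.2.2) h1
    rw [heq]
    dsimp only
    refine ⟨hnd', ?_, ?_, ?_, ?_, hland, ?_⟩
    · exact fun p hp => (List.mem_append.1 hp).elim (h2 p) (hgood' p)
    · intro p hp
      rcases List.mem_append.1 hp with hm | hm
      · exact h3 p hm
      · exact ⟨(r, c), hseedrc, hreach' p hm⟩
    · intro p hp q hq
      rcases List.mem_append.1 hp with hm | hm
      · exact List.mem_append_left _ (h4 p hm q hq)
      · exact hcl' p hm q hq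
    · rw [h5]
      push_cast [List.length_append]
      ring
    · rintro ⟨p1, p2⟩ hps hord
      rcases hord with hlt | ⟨he, hlt⟩
      · exact List.mem_append_left _ (h7 _ hps (Or.inl hlt))
      · by_cases hc2 : p2 < c
        · exact List.mem_append_left _ (h7 _ hps (Or.inr ⟨he, hc2⟩))
        · have hp2 : p2 = c := by omega
          subst he; subst hp2
          exact List.mem_append_right _ (hin hgoodrc hnotin)
  · rw [if_neg hg]
    refine ⟨h1, h2, h3, h4, h5, hland, ?_⟩
    rintro ⟨p1, p2⟩ hps hord
    rcases hord with hlt | ⟨he, hlt⟩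
    · exact h7 _ hps (Or.inl hlt)
    · by_cases hc2 : p2 < c
      · exact h7 _ hps (Or.inr ⟨he, hc2⟩)
      · have hp2 : p2 = c := by omega
        subst he; subst hp2
        by_contra hmem
        exact hg ⟨hps.1.2.2.2.2, hmem, by rcases hps.2 with h | h | h | h <;> tauto⟩

lemma A_inner (grid : List (List Int)) (r : Int) (hr0 : 0 ≤ r) (hr : r < (grid.length : Int)) :
    ∀ (k : Nat) (c : Int), 0 ≤ c → c + (k : Int) = ((grid.headD []).length : Int) →
    ∀ st, AInv grid r c st →
    AInv grid r ((grid.headD []).length : Int)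
      ((PySem.List.pyRange c ((grid.headD []).length : Int) 1).foldl
        (fun st c => stepA grid grid.length (grid.headD []).length
          (grid.length * (grid.headD []).length + 1) r c st) st) := by
  intro k
  induction k with
  | zero =>
    intro c hc0 hck st hst
    have hce : c = ((grid.headD []).length : Int) := by push_cast at hck; omega
    rw [hce] at hst
    rw [hce, PySem.List.pyRange_one_eq_nil (le_refl _)]
    simpa using hst
  | succ k IH =>
    intro c hc0 hck st hst
    have hclt : c < ((grid.headD []).length : Int) := by push_cast at hck; omega
    rw [PySem.List.pyRange_one_cons hclt]
    simp only [List.foldl_cons]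
    exact IH (c + 1) (by omega) (by push_cast at hck ⊢; omega) _
      (stepA_inv grid r c hr0 hr hc0 hclt st hst)

lemma A_wrap (grid : List (List Int)) (r : Int) (hr0 : 0 ≤ r)
    (st : Int × Int × List (Int × Int))
    (h : AInv grid r ((grid.headD []).length : Int) st) : AInv grid (r + 1) 0 st := by
  obtain ⟨h1, h2, h3, h4, h5, h6, h7⟩ := h
  refine ⟨h1, h2, h3, h4, h5, ?_, ?_⟩
  · rw [h6]
    have e2 : (r + 1).toNat = r.toNat + 1 := by omega
    rw [e2, pvSumR_succ, Int.toNat_of_nonneg hr0]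
    simp [pvRowSum, Int.toNat_natCast]
  · rintro ⟨p1, p2⟩ hps hord
    rcases hord with hlt | ⟨he, hlt⟩
    · by_cases hlt' : p1 < r
      · exact h7 _ hps (Or.inl hlt')
      · have he' : p1 = r := by omega
        exact h7 _ hps (Or.inr ⟨he', hps.1.2.2.2.1⟩)
    · have := hps.1.2.2.1
      omega

lemma A_outer (grid : List (List Int)) :
    ∀ (k : Nat) (r : Int), 0 ≤ r → r + (k : Int) = (grid.length : Int) →
    ∀ st, AInv grid r 0 st →
    AInv grid (grid.length : Int) 0
      ((PySem.List.pyRange r (grid.length : Int) 1).foldl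
        (fun st r => (PySem.List.pyRange 0 ((grid.headD []).length : Int) 1).foldl
          (fun st c => stepA grid grid.length (grid.headD []).length
            (grid.length * (grid.headD []).length + 1) r c st) st) st) := by
  intro k
  induction k with
  | zero =>
    intro r hr0 hrk st hst
    have hre : r = (grid.length : Int) := by push_cast at hrk; omega
    rw [hre] at hst
    rw [hre, PySem.List.pyRange_one_eq_nil (le_refl _)]
    simpa using hst
  | succ k IH =>
    intro r hr0 hrk st hst
    have hrlt : r < (grid.length : Int) := by push_cast at hrk; omega
    rw [PySem.List.pyRange_one_cons hrlt]
    simp only [List.foldl_cons]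
    refine IH (r + 1) (by omega) (by push_cast at hrk ⊢; omega) _ ?_
    refine A_wrap grid r hr0 _ ?_
    exact A_inner grid r hr0 hrlt (grid.headD []).length 0 (by omega) (by simp) st hst

lemma numEnclaves_char (grid : List (List Int)) :
    ∃ W : List (Int × Int), numEnclaves grid = pvSumR grid grid.length - W.length ∧
      W.Nodup ∧ (∀ p, p ∈ W ↔ pvReach grid p) := by
  have h0 : AInv grid 0 0 ((0 : Int), (0 : Int), (PySem.Set.empty : PySem.Set (Int × Int))) := by
    refine ⟨List.nodup_nil, by simp [PySem.Set.empty], by simp [PySem.Set.empty],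
      by simp [PySem.Set.empty], by simp [PySem.Set.empty], by simp [pvSumR, pvRowSum], ?_⟩
    rintro ⟨p1, p2⟩ hps hord
    have h1 := hps.1.1
    have h2 := hps.1.2.2.1
    rcases hord with h | ⟨-, h⟩ <;> omega
  have h := A_outer grid grid.length 0 (le_refl _) (by simp) _ h0
  obtain ⟨h1, h2, h3, h4, h5, h6, h7⟩ := h
  refine ⟨_, ?_, h1, ?_⟩
  · show numEnclaves grid = _
    simp only [numEnclaves]
    rw [h5, h6]
    have : ((grid.length : Int)).toNat = grid.length := Int.toNat_natCast _
    rw [this]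
    simp [pvRowSum]
  · intro p
    constructor
    · exact h3 p
    · refine pvClosed_absorb h4 ?_ p
      intro q hq
      exact h7 q hq (Or.inl hq.1.2.1)

def SInv (grid : List (List Int)) (r c : Int) (st : List (Int × Int) × List (Int × Int)) : Prop :=
  st.1 = st.2 ∧ st.2.Nodup ∧
  (∀ p : Int × Int, p ∈ st.2 ↔ (pvSeed grid p ∧ (p.1 < r ∨ (p.1 = r ∧ p.2 < c))))

lemma seedB_inv (grid : List (List Int)) (r c : Int) (hr0 : 0 ≤ r)
    (hr : r < (grid.length : Int)) (hc0 : 0 ≤ c) (hc : c < ((grid.headD []).length : Int))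
    (st : List (Int × Int) × List (Int × Int)) (h : SInv grid r c st) :
    SInv grid r (c + 1) (seedB grid grid.length (grid.headD []).length r c st) := by
  obtain ⟨hQV, hnd, hmem⟩ := h
  simp only [seedB]
  by_cases hg : (r = 0 ∨ r = (grid.length : Int) - 1 ∨ c = 0 ∨ c = ((grid.headD []).length : Int) - 1) ∧
      (grid.getD r.toNat []).getD c.toNat 0 ≠ 0 ∧ (r, c) ∉ st.2
  · rw [if_pos hg]
    obtain ⟨hb, hv, hnotin⟩ := hg
    have hadd : PySem.Set.add st.2 (r, c) = st.2 ++ [(r, c)] := PySem.Set.add_of_not_mem hnotin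
    have hseedrc : pvSeed grid (r, c) := ⟨⟨hr0, hr, hc0, hc, hv⟩, hb⟩
    refine ⟨by rw [hadd, hQV], ?_, ?_⟩
    · rw [hadd, List.nodup_append]
      refine ⟨hnd, List.nodup_singleton _, ?_⟩
      intro a ha b hb'
      simp only [List.mem_singleton] at hb'
      subst hb'
      exact fun he => hnotin (he ▸ ha)
    · intro p
      rw [hadd]
      constructor
      · intro hp
        rcases List.mem_append.1 hp with hm | hm
        · obtain ⟨hs, hord⟩ := (hmem p).1 hm
          exact ⟨hs, by omega⟩
        · simp only [List.mem_singleton] at hm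
          subst hm
          exact ⟨hseedrc, Or.inr ⟨rfl, by omega⟩⟩
      · rintro ⟨hs, hord⟩
        rcases hord with hlt | ⟨he, hlt⟩
        · exact List.mem_append_left _ ((hmem p).2 ⟨hs, Or.inl hlt⟩)
        · by_cases hc2 : p.2 < c
          · exact List.mem_append_left _ ((hmem p).2 ⟨hs, Or.inr ⟨he, hc2⟩⟩)
          · have : p = (r, c) := by
              obtain ⟨p1, p2⟩ := p
              simp only at he hc2 ⊢
              rw [Prod.mk.injEq]
              exact ⟨by omega, by omega⟩
            subst this
            simp
  · rw [if_neg hg]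
    refine ⟨hQV, hnd, ?_⟩
    intro p
    rw [hmem p]
    constructor
    · rintro ⟨hs, hord⟩
      exact ⟨hs, by omega⟩
    · rintro ⟨hs, hord⟩
      refine ⟨hs, ?_⟩
      rcases hord with hlt | ⟨he, hlt⟩
      · exact Or.inl hlt
      · by_cases hc2 : p.2 < c
        · exact Or.inr ⟨he, hc2⟩
        · exfalso
          have hpe : p = (r, c) := by
            obtain ⟨p1, p2⟩ := p
            simp only at he hc2 ⊢
            rw [Prod.mk.injEq]
            exact ⟨by omega, by omega⟩
          subst hpe
          obtain ⟨⟨-, -, -, -, hv⟩, hb⟩ := hs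
          by_cases hmem2 : (r, c) ∈ st.2
          · obtain ⟨-, hord2⟩ := (hmem _).1 hmem2
            omega
          · exact hg ⟨hb, hv, hmem2⟩

lemma S_inner (grid : List (List Int)) (r : Int) (hr0 : 0 ≤ r) (hr : r < (grid.length : Int)) :
    ∀ (k : Nat) (c : Int), 0 ≤ c → c + (k : Int) = ((grid.headD []).length : Int) →
    ∀ st, SInv grid r c st →
    SInv grid r ((grid.headD []).length : Int)
      ((PySem.List.pyRange c ((grid.headD []).length : Int) 1).foldl
        (fun st c => seedB grid grid.length (grid.headD []).length r c st) st) := by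
  intro k
  induction k with
  | zero =>
    intro c hc0 hck st hst
    have hce : c = ((grid.headD []).length : Int) := by push_cast at hck; omega
    rw [hce] at hst
    rw [hce, PySem.List.pyRange_one_eq_nil (le_refl _)]
    simpa using hst
  | succ k IH =>
    intro c hc0 hck st hst
    have hclt : c < ((grid.headD []).length : Int) := by push_cast at hck; omega
    rw [PySem.List.pyRange_one_cons hclt]
    simp only [List.foldl_cons]
    exact IH (c + 1) (by omega) (by push_cast at hck ⊢; omega) _
      (seedB_inv grid r c hr0 hr hc0 hclt st hst)

lemma S_wrap (grid : List (List Int)) (r : Int) (hr0 : 0 ≤ r)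
    (st : List (Int × Int) × List (Int × Int))
    (h : SInv grid r ((grid.headD []).length : Int) st) : SInv grid (r + 1) 0 st := by
  obtain ⟨hQV, hnd, hmem⟩ := h
  refine ⟨hQV, hnd, ?_⟩
  intro p
  rw [hmem p]
  constructor
  · rintro ⟨hs, hord⟩
    refine ⟨hs, Or.inl ?_⟩
    have := hs.1.2.2.2.1
    omega
  · rintro ⟨hs, hord⟩
    refine ⟨hs, ?_⟩
    have h4 := hs.1.2.2.2.1
    have h3 := hs.1.2.2.1
    rcases hord with hlt | ⟨he, hlt⟩
    · by_cases hlt' : p.1 < r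
      · exact Or.inl hlt'
      · exact Or.inr ⟨by omega, h4⟩
    · omega

lemma S_outer (grid : List (List Int)) :
    ∀ (k : Nat) (r : Int), 0 ≤ r → r + (k : Int) = (grid.length : Int) →
    ∀ st, SInv grid r 0 st →
    SInv grid (grid.length : Int) 0
      ((PySem.List.pyRange r (grid.length : Int) 1).foldl
        (fun st r => (PySem.List.pyRange 0 ((grid.headD []).length : Int) 1).foldl
          (fun st c => seedB grid grid.length (grid.headD []).length r c st) st) st) := by
  intro k
  induction k with
  | zero =>
    intro r hr0 hrk st hst
    have hre : r = (grid.length : Int) := by push_cast at hrk; omega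
    rw [hre] at hst
    rw [hre, PySem.List.pyRange_one_eq_nil (le_refl _)]
    simpa using hst
  | succ k IH =>
    intro r hr0 hrk st hst
    have hrlt : r < (grid.length : Int) := by push_cast at hrk; omega
    rw [PySem.List.pyRange_one_cons hrlt]
    simp only [List.foldl_cons]
    refine IH (r + 1) (by omega) (by push_cast at hrk ⊢; omega) _ ?_
    refine S_wrap grid r hr0 _ ?_
    exact S_inner grid r hr0 hrlt (grid.headD []).length 0 (by omega) (by simp) st hst

lemma pvSum_inner (grid : List (List Int)) (r : Int) :
    ∀ (k : Nat) (c : Int), 0 ≤ c → c + (k : Int) = ((grid.headD []).length : Int) →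
    ∀ t : Int,
    (PySem.List.pyRange c ((grid.headD []).length : Int) 1).foldl
      (fun t c => t + (grid.getD r.toNat []).getD c.toNat 0) t =
    t + pvRowSum grid r (grid.headD []).length - pvRowSum grid r c.toNat := by
  intro k
  induction k with
  | zero =>
    intro c hc0 hck t
    have hce : c = ((grid.headD []).length : Int) := by push_cast at hck; omega
    rw [hce, PySem.List.pyRange_one_eq_nil (le_refl _)]
    simp [Int.toNat_natCast]
  | succ k IH =>
    intro c hc0 hck t
    have hclt : c < ((grid.headD []).length : Int) := by push_cast at hck; omega
    rw [PySem.List.pyRange_one_cons hclt]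
    simp only [List.foldl_cons]
    rw [IH (c + 1) (by omega) (by push_cast at hck ⊢; omega)]
    have hcn : (c + 1).toNat = c.toNat + 1 := by omega
    rw [hcn, pvRowSum_succ]
    ring

lemma pvSum_outer (grid : List (List Int)) :
    ∀ (k : Nat) (r : Int), 0 ≤ r → r + (k : Int) = (grid.length : Int) →
    ∀ t : Int,
    (PySem.List.pyRange r (grid.length : Int) 1).foldl
      (fun t r => (PySem.List.pyRange 0 ((grid.headD []).length : Int) 1).foldl
        (fun t c => t + (grid.getD r.toNat []).getD c.toNat 0) t) t =
    t + pvSumR grid grid.length - pvSumR grid r.toNat := by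
  intro k
  induction k with
  | zero =>
    intro r hr0 hrk t
    have hre : r = (grid.length : Int) := by push_cast at hrk; omega
    rw [hre, PySem.List.pyRange_one_eq_nil (le_refl _)]
    simp [Int.toNat_natCast]
  | succ k IH =>
    intro r hr0 hrk t
    have hrlt : r < (grid.length : Int) := by push_cast at hrk; omega
    rw [PySem.List.pyRange_one_cons hrlt]
    simp only [List.foldl_cons]
    rw [pvSum_inner grid r (grid.headD []).length 0 (by omega) (by simp)]
    rw [IH (r + 1) (by omega) (by push_cast at hrk ⊢; omega)]
    have hrn : (r + 1).toNat = r.toNat + 1 := by omega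
    rw [hrn, pvSumR_succ, Int.toNat_of_nonneg hr0]
    simp only [pvRowSum, Int.toNat_zero, List.range_zero, List.map_nil, List.sum_nil]
    ring

lemma pvLen_add_pvRem_le (grid : List (List Int)) (V : List (Int × Int))
    (hnd : V.Nodup) (hgood : ∀ p ∈ V, pvGood grid p) :
    V.length + pvRem grid V ≤ grid.length * (grid.headD []).length := by
  classical
  set P := Finset.range grid.length ×ˢ Finset.range (grid.headD []).length with hP
  have h1 : (P.filter (fun rc => ((rc.1 : Int), (rc.2 : Int)) ∈ V)).card +
      (P.filter (fun rc => ¬ (((rc.1 : Int), (rc.2 : Int)) ∈ V))).card = P.card :=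
    Finset.card_filter_add_card_filter_not _
  have h2 : pvRem grid V ≤ (P.filter (fun rc => ¬ (((rc.1 : Int), (rc.2 : Int)) ∈ V))).card := by
    apply Finset.card_le_card
    intro x hx
    simp only [Finset.mem_filter] at hx ⊢
    exact ⟨hx.1, hx.2.2⟩
  have h3 : V.length ≤ (P.filter (fun rc => ((rc.1 : Int), (rc.2 : Int)) ∈ V)).card := by
    have hmapnd : (V.map (fun p : Int × Int => (p.1.toNat, p.2.toNat))).Nodup := by
      refine List.Nodup.map_on ?_ hnd
      intro x hx y hy hxy
      obtain ⟨hx1, -, hx2, -, -⟩ := hgood x hx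
      obtain ⟨hy1, -, hy2, -, -⟩ := hgood y hy
      obtain ⟨x1, x2⟩ := x
      obtain ⟨y1, y2⟩ := y
      simp only [Prod.mk.injEq] at hxy ⊢
      simp only at hx1 hx2 hy1 hy2
      omega
    have hsub : (V.map (fun p : Int × Int => (p.1.toNat, p.2.toNat))).toFinset ⊆
        P.filter (fun rc => ((rc.1 : Int), (rc.2 : Int)) ∈ V) := by
      intro x hx
      simp only [List.mem_toFinset, List.mem_map] at hx
      obtain ⟨p, hp, hfp⟩ := hx
      obtain ⟨g1, g2, g3, g4, -⟩ := hgood p hp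
      subst hfp
      simp only [Finset.mem_filter, hP, Finset.mem_product, Finset.mem_range]
      refine ⟨⟨by omega, by omega⟩, ?_⟩
      have : ((p.1.toNat : Int), (p.2.toNat : Int)) = p :=
        Prod.ext (Int.toNat_of_nonneg g1) (Int.toNat_of_nonneg g3)
      rw [this]
      exact hp
    calc V.length = (V.map (fun p : Int × Int => (p.1.toNat, p.2.toNat))).length := by
          rw [List.length_map]
      _ = (V.map (fun p : Int × Int => (p.1.toNat, p.2.toNat))).toFinset.card :=
          (List.toFinset_card_of_nodup hmapnd).symm
      _ ≤ _ := Finset.card_le_card hsub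
  have h4 : P.card = grid.length * (grid.headD []).length := by
    rw [Finset.card_product, Finset.card_range, Finset.card_range]
  have h5 : pvRem grid V ≤ (P.filter (fun rc => pvGood grid ((rc.1 : Int), (rc.2 : Int)) ∧
      ((rc.1 : Int), (rc.2 : Int)) ∉ V)).card := le_refl _
  omega

lemma B_assemble (grid : List (List Int)) (S : List (Int × Int) × List (Int × Int))
    (h : SInv grid (grid.length : Int) 0 S) :
    ∃ N, bfsB grid grid.length (grid.headD []).length
        (grid.length * (grid.headD []).length + 1) S.1 S.2 = S.2 ++ N ∧
      (S.2 ++ N).Nodup ∧ (∀ p, p ∈ S.2 ++ N ↔ pvReach grid p) := by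
  obtain ⟨hQV, hnd, hmem⟩ := h
  have hgoodS : ∀ p ∈ S.2, pvGood grid p := fun p hp => ((hmem p).1 hp).1.1
  have hfuel : S.1.length + pvRem grid S.2 < grid.length * (grid.headD []).length + 1 := by
    rw [hQV]
    have := pvLen_add_pvRem_le grid S.2 hnd hgoodS
    omega
  obtain ⟨N, hrun, hnd', hreach', hcl'⟩ :=
    bfsB_spec grid (grid.length * (grid.headD []).length + 1) S.1 S.2 hfuel hnd hgoodS
      (fun p hp => by rw [← hQV]; exact hp)
      (fun p hp => ⟨p, ((hmem p).1 hp).1, Relation.ReflTransGen.refl⟩)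
      (fun p hp hnp => absurd (by rw [hQV]; exact hp) hnp)
  refine ⟨N, hrun, hnd', ?_⟩
  intro p
  constructor
  · exact hreach' p
  · refine pvClosed_absorb hcl' ?_ p
    intro q hq
    exact List.mem_append_left _ ((hmem q).2 ⟨hq, Or.inl hq.1.2.1⟩)

lemma numEnclaves_alt_char (grid : List (List Int)) :
    ∃ W : List (Int × Int), numEnclaves_alt grid = pvSumR grid grid.length - W.length ∧
      W.Nodup ∧ (∀ p, p ∈ W ↔ pvReach grid p) := by
  have h0 : SInv grid 0 0 (([] : List (Int × Int)), (PySem.Set.empty : PySem.Set (Int × Int))) := by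
    refine ⟨rfl, List.nodup_nil, ?_⟩
    intro p
    simp only [PySem.Set.empty, List.not_mem_nil, false_iff]
    rintro ⟨hs, hord⟩
    have h1 := hs.1.1
    have h3 := hs.1.2.2.1
    omega
  have hS := S_outer grid grid.length 0 (le_refl _) (by simp) _ h0
  obtain ⟨N, hrun, hnd', hiff⟩ := B_assemble grid _ hS
  refine ⟨_, ?_, hnd', hiff⟩
  show numEnclaves_alt grid = _
  simp only [numEnclaves_alt]
  rw [hrun]
  rw [pvSum_outer grid grid.length 0 (le_refl _) (by simp) 0]
  have hz : pvSumR grid ((0 : Int)).toNat = 0 := by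
    simp [pvSumR]
  rw [hz]
  ring

-- ===== VERDICT (by name: the statement is the Claim_ definition above) =====
theorem numEnclaves_spec : Claim_equal_numEnclaves := by
  intro grid _ _
  show numEnclaves grid = numEnclaves_alt grid
  obtain ⟨WA, hA, hAnd, hAm⟩ := numEnclaves_char grid
  obtain ⟨WB, hB, hBnd, hBm⟩ := numEnclaves_alt_char grid
  have hperm : WA.Perm WB :=
    (List.perm_ext_iff_of_nodup hAnd hBnd).mpr (fun p => by rw [hAm, hBm])
  rw [hA, hB, hperm.length_eq]
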